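-- pv_equiv track=rewrite | github.com/CreamMeatball/AlgorithmSolving | 1711.py | pythagoras
-- ===== SOURCE A (Python) =====
-- def pythagoras(point):
--     a = (point[0][0] - point[1][0]) ** 2 + (point[0][1] - point[1][1]) ** 2
--     b = (point[1][0] - point[2][0]) ** 2 + (point[1][1] - point[2][1]) ** 2
--     c = (point[2][0] - point[0][0]) ** 2 + (point[2][1] - point[0][1]) ** 2
--     for i in range(3):
--         if a + b == c:
--             return True
--         a, b, c = b, c, a # good
--     # sides = [a, b, c]
--     # sides.sort()
--     # if sides[0] + sides[1] == sides[2]: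
--     #     return True
--     # 주의해야할게
--     # a, b, c 구할 때 **0.5 했다가
--     # a**2 + b**2 == c**2 이렇게 하면
--     # 소수점 아래 특정 자릿수에서 잘렸다가, 그걸 다시 제곱을 해서 그런지
--     # == 가 True 반환이 안되네.
--     # 그래서 **0.5 연산 안 한 다음 그냥 a + b == c 이렇게 하니까 됨.
--     return False
-- ===== SOURCE B (Python) =====
-- def d2(p, q):
--     return (p[0] - q[0]) ** 2 + (p[1] - q[1]) ** 2
--
--
-- def pythagoras(point):
--     p, q, r = point[0], point[1], point[2]
--     sides = sorted([d2(p, q), d2(q, r), d2(r, p)])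
--     return sides[0] + sides[1] == sides[2]
-- ===== Notes on version B (the rewrite author's own statement) =====
-- stated objective: simpler
-- what changed: Replaces A's three-step rotate-and-compare loop by sorting the three squared side lengths and testing once that the two smallest sum to the largest (valid because squared sides are non-negative).
import Mathlib
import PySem

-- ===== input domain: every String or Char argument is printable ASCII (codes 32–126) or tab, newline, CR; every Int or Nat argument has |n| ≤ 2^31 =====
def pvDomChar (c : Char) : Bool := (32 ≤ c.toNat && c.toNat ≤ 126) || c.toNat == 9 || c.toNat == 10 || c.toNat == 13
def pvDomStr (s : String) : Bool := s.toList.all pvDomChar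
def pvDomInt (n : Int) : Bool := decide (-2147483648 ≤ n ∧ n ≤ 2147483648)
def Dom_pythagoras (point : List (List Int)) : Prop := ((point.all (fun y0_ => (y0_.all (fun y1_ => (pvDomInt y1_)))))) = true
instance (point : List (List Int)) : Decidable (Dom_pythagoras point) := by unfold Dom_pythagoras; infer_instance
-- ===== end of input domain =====

-- B sorts the three squared side lengths and tests once that the two smallest sum to the largest (simpler); return value only.
-- ===== PORT A =====
-- the 'for i in range(3)' loop with rotating state (a, b, c)
def pythagorasLoop : Nat → Int → Int → Int → Bool
  | 0, _, _, _ => false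
  | n + 1, a, b, c => if a + b == c then true else pythagorasLoop n b c a

def pythagoras (point : List (List Int)) : Bool :=
  let p0 := PySem.List.pyGetD point 0 []
  let p1 := PySem.List.pyGetD point 1 []
  let p2 := PySem.List.pyGetD point 2 []
  let a := (PySem.List.pyGetD p0 0 0 - PySem.List.pyGetD p1 0 0) ^ 2 + (PySem.List.pyGetD p0 1 0 - PySem.List.pyGetD p1 1 0) ^ 2
  let b := (PySem.List.pyGetD p1 0 0 - PySem.List.pyGetD p2 0 0) ^ 2 + (PySem.List.pyGetD p1 1 0 - PySem.List.pyGetD p2 1 0) ^ 2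
  let c := (PySem.List.pyGetD p2 0 0 - PySem.List.pyGetD p0 0 0) ^ 2 + (PySem.List.pyGetD p2 1 0 - PySem.List.pyGetD p0 1 0) ^ 2
  pythagorasLoop 3 a b c

-- ===== PORT B =====
-- helper d2: squared Euclidean distance between two points
def pyD2 (p q : List Int) : Int :=
  (PySem.List.pyGetD p 0 0 - PySem.List.pyGetD q 0 0) ^ 2 + (PySem.List.pyGetD p 1 0 - PySem.List.pyGetD q 1 0) ^ 2

def pythagoras_alt (point : List (List Int)) : Bool :=
  let p := PySem.List.pyGetD point 0 []
  let q := PySem.List.pyGetD point 1 []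
  let r := PySem.List.pyGetD point 2 []
  let sides := PySem.List.sorted [pyD2 p q, pyD2 q r, pyD2 r p] (fun x => x) false
  PySem.List.pyGetD sides 0 0 + PySem.List.pyGetD sides 1 0 == PySem.List.pyGetD sides 2 0

-- ===== PRECONDITION & SPEC =====
-- Pre_ excludes exactly the inputs where A raises IndexError: fewer than 3 points, or one of the
-- first three points with fewer than 2 coordinates.
def Pre_pythagoras (point : List (List Int)) : Prop :=
  3 ≤ point.length ∧ ∀ r ∈ point.take 3, 2 ≤ r.length
instance (point : List (List Int)) : Decidable (Pre_pythagoras point) := by unfold Pre_pythagoras; infer_instance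
def pvWitness_pythagoras : List (List Int) := [[0, 0], [3, 0], [0, 4]]

def Spec_pythagoras (point : List (List Int)) (out : Bool) : Prop := out = pythagoras_alt point
instance (point : List (List Int)) (out : Bool) : Decidable (Spec_pythagoras point out) := by unfold Spec_pythagoras; infer_instance

-- ===== CLAIM (what is proved, stated in full; the proofs are below) =====
def Claim_equal_pythagoras : Prop := ∀ (point : List (List Int)), Dom_pythagoras point → Pre_pythagoras point → Spec_pythagoras point (pythagoras point)

-- ===== LEMMAS AND PROOFS =====
-- name the value of sorted on a symbolic 3-element list
theorem sortedTriple (a b c x y z : Int) (hperm : List.Perm [x, y, z] [a, b, c])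
    (hxy : x ≤ y) (hyz : y ≤ z) :
    PySem.List.sorted [a, b, c] (fun v => v) false = [x, y, z] :=
  PySem.List.sorted_id_eq_of_perm_of_pairwise _ _ hperm
    (by simp [List.pairwise_cons]; omega)

theorem sorted3_eq (a b c : Int) :
    ∃ x y z : Int, PySem.List.sorted [a, b, c] (fun v => v) false = [x, y, z] ∧
      x ≤ y ∧ y ≤ z ∧ [x, y, z].Perm [a, b, c] := by
  rcases le_total a b with hab | hab <;> rcases le_total b c with hbc | hbc <;>
    rcases le_total a c with hac | hac
  · exact ⟨a, b, c, sortedTriple _ _ _ _ _ _ (List.Perm.refl _) hab hbc, hab, hbc, List.Perm.refl _⟩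
  · exact ⟨a, b, c, sortedTriple _ _ _ _ _ _ (List.Perm.refl _) hab hbc, hab, hbc, List.Perm.refl _⟩
  · refine ⟨a, c, b, sortedTriple _ _ _ _ _ _ ?_ hac hbc, hac, hbc, ?_⟩ <;>
      exact (List.Perm.swap b c []).cons a
  · have hp : List.Perm [c, a, b] [a, b, c] := by
      simpa using List.perm_append_comm (l₁ := [c]) (l₂ := [a, b])
    exact ⟨c, a, b, sortedTriple _ _ _ _ _ _ hp hac hab, hac, hab, hp⟩
  · refine ⟨b, a, c, sortedTriple _ _ _ _ _ _ ?_ hab hac, hab, hac, ?_⟩ <;>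
      exact List.Perm.swap a b [c]
  · have hp : List.Perm [b, c, a] [a, b, c] := by
      simpa using List.perm_append_comm (l₁ := [b, c]) (l₂ := [a])
    exact ⟨b, c, a, sortedTriple _ _ _ _ _ _ hp hbc (by omega), hbc, by omega, hp⟩
  · have hp : List.Perm [c, b, a] [a, b, c] := by simpa using List.reverse_perm [a, b, c]
    exact ⟨c, b, a, sortedTriple _ _ _ _ _ _ hp hbc hab, hbc, hab, hp⟩
  · have hp : List.Perm [c, b, a] [a, b, c] := by simpa using List.reverse_perm [a, b, c]
    exact ⟨c, b, a, sortedTriple _ _ _ _ _ _ hp hbc hab, hbc, hab, hp⟩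

-- the core arithmetic fact: for non-negative a b c, the rotate-and-compare test agrees with
-- the sorted two-smallest-sum-to-largest test
theorem core3 (a b c : Int) (ha : 0 ≤ a) (hb : 0 ≤ b) (hc : 0 ≤ c) :
    pythagorasLoop 3 a b c =
      ((PySem.List.sorted [a, b, c] (fun v => v) false).getD 0 0 +
        (PySem.List.sorted [a, b, c] (fun v => v) false).getD 1 0 ==
        (PySem.List.sorted [a, b, c] (fun v => v) false).getD 2 0) := by
  obtain ⟨x, y, z, hs, hxy, hyz, hperm⟩ := sorted3_eq a b c
  rw [hs]
  have hsum : x + (y + z) = a + (b + c) := by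
    have := List.Perm.sum_eq hperm
    simpa using this
  have hmaxmem : z = a ∨ z = b ∨ z = c := by
    have : z ∈ [a, b, c] := hperm.mem_iff.mp (by simp)
    simpa using this
  have hub : ∀ v ∈ [a, b, c], v ≤ z := by
    intro v hv
    have : v ∈ [x, y, z] := hperm.symm.mem_iff.mp hv
    simp at this
    rcases this with h | h | h <;> omega
  have hva := hub a (by simp)
  have hvb := hub b (by simp)
  have hvc := hub c (by simp)
  simp only [pythagorasLoop, Bool.if_true_left, List.getD_cons_zero, List.getD_cons_succ]
  rw [Bool.eq_iff_iff]
  simp only [Bool.or_eq_true, Bool.or_false, decide_eq_true_eq, beq_iff_eq]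
  rcases hmaxmem with h | h | h <;> omega

-- ===== VERDICT (by name: the statement is the Claim_ definition above) =====
theorem pythagoras_spec : Claim_equal_pythagoras := by
  intro point _ hpre
  obtain ⟨hlen, hrows⟩ := hpre
  rcases point with _ | ⟨p0, _ | ⟨p1, _ | ⟨p2, rest⟩⟩⟩ <;> simp at hlen
  have h0 := hrows p0 (by simp)
  have h1 := hrows p1 (by simp)
  have h2 := hrows p2 (by simp)
  rcases p0 with _ | ⟨x0, _ | ⟨y0, t0⟩⟩ <;> simp at h0
  rcases p1 with _ | ⟨x1, _ | ⟨y1, t1⟩⟩ <;> simp at h1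
  rcases p2 with _ | ⟨x2, _ | ⟨y2, t2⟩⟩ <;> simp at h2
  unfold Spec_pythagoras pythagoras pythagoras_alt pyD2
  simp only [PySem.List.pyGetD_ofNat', List.getD_cons_zero, List.getD_cons_succ]
  apply core3 <;> positivity
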